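-- pv_equiv track=rewrite | github.com/katha-begin/nukemultishot | multishot/deadline/farm_script.py | _convert_windows_to_linux_path
-- ===== SOURCE A (Python) =====
-- def _convert_windows_to_linux_path(path: str) -> str:
--     """
--     Convert Windows paths to Linux paths for Deadline render farm.
--
--     Args:
--         path: Windows path (e.g., V:/SWA/...)
--
--     Returns:
--         Linux path (e.g., /mnt/igloo_swa_v/SWA/...)
--     """
--     # Path mappings
--     path_mappings = {
--         'V:/': '/mnt/igloo_swa_v/',
--         'V:\\': '/mnt/igloo_swa_v/',
--         'W:/': '/mnt/igloo_swa_w/',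
--         'W:\\': '/mnt/igloo_swa_w/',
--         'T:/': '/mnt/ppr_dev_t/',
--         'T:\\': '/mnt/ppr_dev_t/'
--     }
--
--     converted_path = path
--     for win_path, linux_path in path_mappings.items():
--         if converted_path.startswith(win_path):
--             converted_path = converted_path.replace(win_path, linux_path, 1)
--             break
--
--     # Replace backslashes with forward slashes
--     converted_path = converted_path.replace('\\', '/')
--
--     return converted_path
-- ===== SOURCE B (Python) =====
-- _MAPPING = {
--     'V:/': '/mnt/igloo_swa_v/',
--     'W:/': '/mnt/igloo_swa_w/',
--     'T:/': '/mnt/ppr_dev_t/',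
-- }
--
--
-- def _convert_windows_to_linux_path(path: str) -> str:
--     """Normalize separators first, then one direct dict lookup on the 3-char prefix."""
--     norm = path.replace('\\', '/')
--     linux = _MAPPING.get(norm[:3])
--     if linux is not None:
--         return linux + norm[3:]
--     return norm
-- ===== Notes on version B (the rewrite author's own statement) =====
-- stated objective: simpler
-- what changed: A scans six drive prefixes with startswith and a break then normalizes backslashes; B normalizes separators first and does one direct dict lookup on the 3-char prefix of the normalized path, collapsing the duplicate slash/backslash entries and eliminating the scan loop.
import Mathlib
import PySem

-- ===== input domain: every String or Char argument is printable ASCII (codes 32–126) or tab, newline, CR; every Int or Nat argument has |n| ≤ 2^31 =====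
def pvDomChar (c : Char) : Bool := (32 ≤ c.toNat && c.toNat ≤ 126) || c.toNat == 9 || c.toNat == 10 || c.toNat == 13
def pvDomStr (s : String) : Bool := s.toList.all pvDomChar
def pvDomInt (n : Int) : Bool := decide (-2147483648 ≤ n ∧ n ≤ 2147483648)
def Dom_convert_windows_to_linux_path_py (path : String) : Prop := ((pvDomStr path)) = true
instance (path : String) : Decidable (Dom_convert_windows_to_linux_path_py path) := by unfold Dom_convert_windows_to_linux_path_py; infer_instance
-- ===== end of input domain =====

-- B replaces A's linear scan over six drive prefixes (and the trailing backslash pass) by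
-- normalizing separators first and doing one direct keyed lookup on the 3-char prefix (objective: simpler).

-- ===== PORT A =====

-- hand port of Python's s.replace(old, new, 1) for NONEMPTY old: exact — it replaces the
-- first occurrence of old (located by str.find) if there is one, else returns s unchanged.
def pvReplaceOnce (cs old new : List Char) : List Char :=
  let i := PySem.Chars.find cs old
  if i = -1 then cs else cs.take i.toNat ++ new ++ cs.drop (i.toNat + old.length)

def pvMappingsA : List (List Char × List Char) :=
  [("V:/".toList, "/mnt/igloo_swa_v/".toList),
   ("V:\\".toList, "/mnt/igloo_swa_v/".toList),
   ("W:/".toList, "/mnt/igloo_swa_w/".toList),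
   ("W:\\".toList, "/mnt/igloo_swa_w/".toList),
   ("T:/".toList, "/mnt/ppr_dev_t/".toList),
   ("T:\\".toList, "/mnt/ppr_dev_t/".toList)]

-- A's for-loop with break over the mapping items
def pvLoopA : List (List Char × List Char) → List Char → List Char
  | [], cs => cs
  | (w, l) :: rest, cs =>
      if PySem.Chars.startswith cs w then pvReplaceOnce cs w l else pvLoopA rest cs

def convert_windows_to_linux_path_py (path : String) : String :=
  String.ofList (PySem.Chars.replace (pvLoopA pvMappingsA path.toList) "\\".toList "/".toList)

-- ===== PORT B =====

def pvMapB : PySem.Dict (List Char) (List Char) :=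
  ((PySem.Dict.empty.insert "V:/".toList "/mnt/igloo_swa_v/".toList).insert
      "W:/".toList "/mnt/igloo_swa_w/".toList).insert
      "T:/".toList "/mnt/ppr_dev_t/".toList

def convert_windows_to_linux_path_py_alt (path : String) : String :=
  let norm := PySem.Chars.replace path.toList "\\".toList "/".toList
  match pvMapB.get? (PySem.Chars.slice norm none (some 3)) with
  | some linux => String.ofList (linux ++ PySem.Chars.slice norm (some 3) none)
  | none => String.ofList norm

-- ===== PRECONDITION & SPEC =====
def Spec_convert_windows_to_linux_path_py (path : String) (out : String) : Prop := out = convert_windows_to_linux_path_py_alt path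
instance (path : String) (out : String) : Decidable (Spec_convert_windows_to_linux_path_py path out) := by unfold Spec_convert_windows_to_linux_path_py; infer_instance

-- ===== CLAIM (what is proved, stated in full; the proofs are below) =====
def Claim_equal_convert_windows_to_linux_path_py : Prop := ∀ (path : String), Dom_convert_windows_to_linux_path_py path → Spec_convert_windows_to_linux_path_py path (convert_windows_to_linux_path_py path)

-- ===== LEMMAS AND PROOFS =====

def pvNorm (c : Char) : Char := if c = '\\' then '/' else c

theorem pv_replace_go_single (o n : Char) :
    ∀ (fuel : Nat) (l acc : List Char), l.length ≤ fuel →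
      PySem.Chars.replace.go [o] [n] fuel l acc
        = acc.reverse ++ l.map (fun c => if c = o then n else c) := by
  intro fuel
  induction fuel with
  | zero =>
      intro l acc h
      have : l = [] := List.eq_nil_of_length_eq_zero (Nat.le_zero.mp h)
      subst this; simp [PySem.Chars.replace.go]
  | succ m ih =>
      intro l acc h
      cases l with
      | nil => simp [PySem.Chars.replace.go]
      | cons c t =>
          simp only [PySem.Chars.replace.go, List.isPrefixOf]
          by_cases hc : c = o
          · subst hc
            simp only [List.length_cons] at h
            simp [ih t _ (by omega), List.map_cons]
          · have : (o == c) = false := by simp; exact fun e => hc e.symm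
            simp only [List.length_cons] at h
            simp [this, ih t _ (by omega), hc]

theorem pv_replace_single_eq_map (cs : List Char) :
    PySem.Chars.replace cs "\\".toList "/".toList = cs.map pvNorm := by
  have : ("\\".toList : List Char) = ['\\'] := by decide
  have h2 : ("/".toList : List Char) = ['/'] := by decide
  rw [this, h2, PySem.Chars.replace]
  simp only [List.isEmpty_iff, reduceCtorEq, if_false]
  rw [pv_replace_go_single '\\' '/' cs.length cs [] le_rfl]
  simp [pvNorm]

theorem pv_find_zero_of_prefix (s sub : List Char) (h : sub <+: s) :
    PySem.Chars.find s sub = 0 := by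
  have h0 : 0 ≤ PySem.Chars.find s sub := (PySem.Chars.find_nonneg_iff s sub).mpr h.isInfix
  obtain ⟨-, hmin⟩ := PySem.Chars.find_spec (s:=s) (sub:=sub) h0
  by_contra hne
  have hpos : 0 < (PySem.Chars.find s sub).toNat := by omega
  exact hmin 0 hpos (by simpa using h)

theorem pv_replaceOnce_of_prefix (w l rest : List Char) :
    pvReplaceOnce (w ++ rest) w l = l ++ rest := by
  unfold pvReplaceOnce
  have hf : PySem.Chars.find (w ++ rest) w = 0 :=
    pv_find_zero_of_prefix _ _ ⟨rest, rfl⟩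
  simp [hf]

theorem pv_norm_eq_slash_iff (c : Char) : pvNorm c = '/' ↔ c = '/' ∨ c = '\\' := by
  unfold pvNorm; split_ifs with h <;> simp [h]

theorem pv_norm_eq_iff (c d : Char) (hd : d ≠ '/') (hd2 : d ≠ '\\') : pvNorm c = d ↔ c = d := by
  unfold pvNorm; split_ifs with h
  · subst h
    constructor
    · intro e; exact absurd e.symm hd
    · intro e; exact absurd e.symm hd2
  · exact Iff.rfl

theorem pvLoopA_cons_pos (w l cs : List Char) (m : List (List Char × List Char))
    (h : PySem.Chars.startswith cs w = true) :
    pvLoopA ((w, l) :: m) cs = pvReplaceOnce cs w l := by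
  simp [pvLoopA, h]

theorem pvLoopA_cons_neg (w l cs : List Char) (m : List (List Char × List Char))
    (h : PySem.Chars.startswith cs w = false) :
    pvLoopA ((w, l) :: m) cs = pvLoopA m cs := by
  simp [pvLoopA, h]

theorem pv_main (cs : List Char) :
    List.map pvNorm (pvLoopA pvMappingsA cs) =
      (match pvMapB.get? ((cs.map pvNorm).take 3) with
       | some l => l ++ (cs.map pvNorm).drop 3
       | none => cs.map pvNorm) := by
  match cs with
  | [] => decide
  | [a] =>
      simp [pvLoopA, pvMappingsA, PySem.Chars.startswith, List.isPrefixOf,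
        pvMapB, PySem.Dict.get?_insert, PySem.Dict.get?_empty]
  | [a, b] =>
      simp [pvLoopA, pvMappingsA, PySem.Chars.startswith, List.isPrefixOf,
        pvMapB, PySem.Dict.get?_insert, PySem.Dict.get?_empty]
  | a :: b :: c :: rest =>
      by_cases hb : b = ':'
      case neg =>
        have hb1 : (':' == b) = false := by simp; exact fun e => hb e.symm
        have hb2 : pvNorm b ≠ ':' := fun e => hb ((pv_norm_eq_iff b ':' (by decide) (by decide)).mp e)
        simp [pvLoopA, pvMappingsA, PySem.Chars.startswith, List.isPrefixOf, hb1,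
          pvMapB, PySem.Dict.get?_insert, PySem.Dict.get?_empty, hb2]
      case pos =>
      subst hb
      by_cases hsl : c = '/' ∨ c = '\\'
      case neg =>
        rw [not_or] at hsl
        have hc1 : ('/' == c) = false := by simp; exact fun e => hsl.1 e.symm
        have hc2 : ('\\' == c) = false := by simp; exact fun e => hsl.2 e.symm
        have hc3 : pvNorm c ≠ '/' := fun e => by
          rcases (pv_norm_eq_slash_iff c).mp e with h | h
          · exact hsl.1 h
          · exact hsl.2 h
        simp [pvLoopA, pvMappingsA, PySem.Chars.startswith, List.isPrefixOf, hc1, hc2,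
          pvMapB, PySem.Dict.get?_insert, PySem.Dict.get?_empty, hc3]
      case pos =>
      have hnormc : pvNorm c = '/' := by
        rcases hsl with h | h <;> simp [pvNorm, h]
      by_cases haV : a = 'V'
      · subst haV
        rcases hsl with h | h <;> subst h
        · simp only [pvMappingsA]
          rw [pvLoopA_cons_pos _ _ _ _ (by simp [PySem.Chars.startswith, List.isPrefixOf]),
            show ('V' :: ':' :: '/' :: rest) = "V:/".toList ++ rest from rfl,
            pv_replaceOnce_of_prefix]
          simp [pvMapB, PySem.Dict.get?_insert, pvNorm]
        · simp only [pvMappingsA]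
          rw [pvLoopA_cons_neg _ _ _ _ (by simp [PySem.Chars.startswith, List.isPrefixOf]),
            pvLoopA_cons_pos _ _ _ _ (by simp [PySem.Chars.startswith, List.isPrefixOf]),
            show ('V' :: ':' :: '\\' :: rest) = "V:\\".toList ++ rest from rfl,
            pv_replaceOnce_of_prefix]
          simp [pvMapB, PySem.Dict.get?_insert, pvNorm]
      by_cases haW : a = 'W'
      · subst haW
        rcases hsl with h | h <;> subst h
        · simp only [pvMappingsA]
          rw [pvLoopA_cons_neg _ _ _ _ (by simp [PySem.Chars.startswith, List.isPrefixOf]),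
            pvLoopA_cons_neg _ _ _ _ (by simp [PySem.Chars.startswith, List.isPrefixOf]),
            pvLoopA_cons_pos _ _ _ _ (by simp [PySem.Chars.startswith, List.isPrefixOf]),
            show ('W' :: ':' :: '/' :: rest) = "W:/".toList ++ rest from rfl,
            pv_replaceOnce_of_prefix]
          simp [pvMapB, PySem.Dict.get?_insert, pvNorm]
        · simp only [pvMappingsA]
          rw [pvLoopA_cons_neg _ _ _ _ (by simp [PySem.Chars.startswith, List.isPrefixOf]),
            pvLoopA_cons_neg _ _ _ _ (by simp [PySem.Chars.startswith, List.isPrefixOf]),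
            pvLoopA_cons_neg _ _ _ _ (by simp [PySem.Chars.startswith, List.isPrefixOf]),
            pvLoopA_cons_pos _ _ _ _ (by simp [PySem.Chars.startswith, List.isPrefixOf]),
            show ('W' :: ':' :: '\\' :: rest) = "W:\\".toList ++ rest from rfl,
            pv_replaceOnce_of_prefix]
          simp [pvMapB, PySem.Dict.get?_insert, pvNorm]
      by_cases haT : a = 'T'
      · subst haT
        rcases hsl with h | h <;> subst h
        · simp only [pvMappingsA]
          rw [pvLoopA_cons_neg _ _ _ _ (by simp [PySem.Chars.startswith, List.isPrefixOf]),
            pvLoopA_cons_neg _ _ _ _ (by simp [PySem.Chars.startswith, List.isPrefixOf]),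
            pvLoopA_cons_neg _ _ _ _ (by simp [PySem.Chars.startswith, List.isPrefixOf]),
            pvLoopA_cons_neg _ _ _ _ (by simp [PySem.Chars.startswith, List.isPrefixOf]),
            pvLoopA_cons_pos _ _ _ _ (by simp [PySem.Chars.startswith, List.isPrefixOf]),
            show ('T' :: ':' :: '/' :: rest) = "T:/".toList ++ rest from rfl,
            pv_replaceOnce_of_prefix]
          simp [pvMapB, pvNorm]
        · simp only [pvMappingsA]
          rw [pvLoopA_cons_neg _ _ _ _ (by simp [PySem.Chars.startswith, List.isPrefixOf]),
            pvLoopA_cons_neg _ _ _ _ (by simp [PySem.Chars.startswith, List.isPrefixOf]),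
            pvLoopA_cons_neg _ _ _ _ (by simp [PySem.Chars.startswith, List.isPrefixOf]),
            pvLoopA_cons_neg _ _ _ _ (by simp [PySem.Chars.startswith, List.isPrefixOf]),
            pvLoopA_cons_neg _ _ _ _ (by simp [PySem.Chars.startswith, List.isPrefixOf]),
            pvLoopA_cons_pos _ _ _ _ (by simp [PySem.Chars.startswith, List.isPrefixOf]),
            show ('T' :: ':' :: '\\' :: rest) = "T:\\".toList ++ rest from rfl,
            pv_replaceOnce_of_prefix]
          simp [pvMapB, pvNorm]
      -- no drive letter matches
      have ha1 : ('V' == a) = false := by simp; exact fun e => haV e.symm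
      have ha2 : ('W' == a) = false := by simp; exact fun e => haW e.symm
      have ha3 : ('T' == a) = false := by simp; exact fun e => haT e.symm
      have hn1 : pvNorm a ≠ 'V' := fun e => haV ((pv_norm_eq_iff a 'V' (by decide) (by decide)).mp e)
      have hn2 : pvNorm a ≠ 'W' := fun e => haW ((pv_norm_eq_iff a 'W' (by decide) (by decide)).mp e)
      have hn3 : pvNorm a ≠ 'T' := fun e => haT ((pv_norm_eq_iff a 'T' (by decide) (by decide)).mp e)
      simp [pvLoopA, pvMappingsA, PySem.Chars.startswith, List.isPrefixOf, ha1, ha2, ha3,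
        pvMapB, PySem.Dict.get?_insert, PySem.Dict.get?_empty, hn1, hn2, hn3]

-- ===== VERDICT (by name: the statement is the Claim_ definition above) =====
theorem convert_windows_to_linux_path_py_spec : Claim_equal_convert_windows_to_linux_path_py := by
  intro path _
  unfold Spec_convert_windows_to_linux_path_py convert_windows_to_linux_path_py convert_windows_to_linux_path_py_alt
  simp only [PySem.Chars.slice_eq_listSlice, PySem.List.slice_to _ (by norm_num : (0:Int) ≤ 3),
    PySem.List.slice_from _ (by norm_num : (0:Int) ≤ 3), pv_replace_single_eq_map,
    show Int.toNat 3 = 3 from rfl]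
  rw [pv_main path.toList]
  cases h : pvMapB.get? (List.take 3 (List.map pvNorm path.toList)) <;>
    simp [String.ofList_append]
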